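-- pv_equiv track=rewrite | github.com/annagolenkovskaya/NLP | test.py | back_to_initial_form
-- ===== SOURCE A (Python) =====
-- def back_to_initial_form(tagged_string, initial_form, starting_symbol_number):
-- 	answer = []
-- 	splited_tagged_string = tagged_string.split()
-- 	splited_initial_form = initial_form.split()
-- 	current_start_symbol_number = starting_symbol_number
-- 	for i in range(len(splited_initial_form)):
-- 		current_end_symbol_number = current_start_symbol_number + len(splited_initial_form[i])
-- 		if 	splited_initial_form[i] in [".", ",", ":", ";", "'", "!", "?", "-", "\"", "\'"]:
-- 			current_end_symbol_number -=1
-- 		# if splited_tagged_string[2*i+1] != "<OUT>":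
-- 		answer.append([splited_initial_form[i], current_start_symbol_number, current_end_symbol_number, splited_tagged_string[2*i+1]])
-- 		current_start_symbol_number = current_end_symbol_number+1
-- 	return answer
-- ===== SOURCE B (Python) =====
-- from itertools import accumulate
--
-- _PUNCT = {".", ",", ":", ";", "'", "!", "?", "-", "\""}
--
-- def back_to_initial_form(tagged_string, initial_form, starting_symbol_number):
--     words = initial_form.split()
--     tags = tagged_string.split()
--     advances = [len(w) + (0 if w in _PUNCT else 1) for w in words]
--     starts = list(accumulate([starting_symbol_number] + advances))[:-1]
--     return [[words[i], starts[i], starts[i] + advances[i] - 1, tags[2 * i + 1]]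
--             for i in range(len(words))]
-- ===== Notes on version B (the rewrite author's own statement) =====
-- stated objective: alternative
-- what changed: Replaces A's single running-offset loop by a three-stage decomposition: a map computing per-token advances, itertools.accumulate producing all start positions at once, and an index comprehension assembling spans with tags, with a set for the punctuation test.
import Mathlib
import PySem

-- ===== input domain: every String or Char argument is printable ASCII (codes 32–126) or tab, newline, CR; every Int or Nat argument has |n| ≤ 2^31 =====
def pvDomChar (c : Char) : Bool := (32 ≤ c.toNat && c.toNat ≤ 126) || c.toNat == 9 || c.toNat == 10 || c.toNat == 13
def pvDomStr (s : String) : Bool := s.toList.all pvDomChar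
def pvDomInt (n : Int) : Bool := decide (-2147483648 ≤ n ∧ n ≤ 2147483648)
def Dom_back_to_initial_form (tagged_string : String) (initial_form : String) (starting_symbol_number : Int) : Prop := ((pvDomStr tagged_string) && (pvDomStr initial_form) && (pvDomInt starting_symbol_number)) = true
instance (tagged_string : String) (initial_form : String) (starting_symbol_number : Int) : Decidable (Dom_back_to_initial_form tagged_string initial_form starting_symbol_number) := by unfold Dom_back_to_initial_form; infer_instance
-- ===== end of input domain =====

-- B replaces A's single running-offset loop by per-token advances + accumulated start positions + an index-comprehension assembly (alternative decomposition, same cost); return values only, neither mutates its arguments.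

-- ===== PORT A =====
-- A's punctuation list literal (note the duplicate "'" exactly as in the source)
def pvPunctListA : List String := [".", ",", ":", ";", "'", "!", "?", "-", "\"", "'"]

-- the body of A's for-loop, carried state = (answer, current_start_symbol_number)
def pvStepA (sif stt : List String) (st : List (String × Int × Int × String) × Int) (i : Int) :
    List (String × Int × Int × String) × Int :=
  let w := PySem.List.pyGetD sif i ""            -- in range: i ∈ range(len(sif))
  let e0 := st.2 + PySem.Str.len w
  let e := if pvPunctListA.contains w then e0 - 1 else e0
  (st.1 ++ [(w, st.2, e, PySem.List.pyGetD stt (2 * i + 1) "")], e + 1)  -- tag lookup: in range under Pre_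

def back_to_initial_form (tagged_string : String) (initial_form : String) (starting_symbol_number : Int) : List (String × Int × Int × String) :=
  let stt := PySem.Str.split₀ tagged_string
  let sif := PySem.Str.split₀ initial_form
  ((PySem.List.pyRange 0 (sif.length : Int) 1).foldl (pvStepA sif stt) ([], starting_symbol_number)).1

-- ===== PORT B =====
def pvPunctSet : PySem.Set String := PySem.Set.ofList [".", ",", ":", ";", "'", "!", "?", "-", "\""]

-- the advance of one token: len(w) + 1, or len(w) for a punctuation token
def pvAdv (w : String) : Int := PySem.Str.len w + (if PySem.Set.contains pvPunctSet w then 0 else 1)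

-- itertools.accumulate on [s] ++ l (running sums, step for step)
def pvAccumulate (s : Int) : List Int → List Int
  | [] => [s]
  | a :: rest => s :: pvAccumulate (s + a) rest

-- the body of B's final comprehension
def pvEntB (words tags : List String) (starts advances : List Int) (i : Int) :
    String × Int × Int × String :=
  (PySem.List.pyGetD words i "",
   PySem.List.pyGetD starts i 0,
   PySem.List.pyGetD starts i 0 + PySem.List.pyGetD advances i 0 - 1,
   PySem.List.pyGetD tags (2 * i + 1) "")

def back_to_initial_form_alt (tagged_string : String) (initial_form : String) (starting_symbol_number : Int) : List (String × Int × Int × String) :=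
  let words := PySem.Str.split₀ initial_form
  let tags := PySem.Str.split₀ tagged_string
  let advances := words.map pvAdv
  -- list(accumulate([s0] + advances))[:-1]: the accumulated list is nonempty, so [:-1] = dropLast exactly
  let starts := (pvAccumulate starting_symbol_number advances).dropLast
  (PySem.List.pyRange 0 (words.length : Int) 1).map (pvEntB words tags starts advances)

-- ===== PRECONDITION & SPEC =====
-- Pre_ excludes exactly the inputs where the tag lookup splited_tagged_string[2*i+1] raises IndexError in A (B raises there too).
def Pre_back_to_initial_form (tagged_string : String) (initial_form : String) (starting_symbol_number : Int) : Prop :=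
  2 * (PySem.Str.split₀ initial_form).length ≤ (PySem.Str.split₀ tagged_string).length
instance (tagged_string : String) (initial_form : String) (starting_symbol_number : Int) : Decidable (Pre_back_to_initial_form tagged_string initial_form starting_symbol_number) := by unfold Pre_back_to_initial_form; infer_instance

def pvWitness_back_to_initial_form : String × String × Int := ("hello B-X , O", "hello ,", 0)

def Spec_back_to_initial_form (tagged_string : String) (initial_form : String) (starting_symbol_number : Int) (out : List (String × Int × Int × String)) : Prop := out = back_to_initial_form_alt tagged_string initial_form starting_symbol_number
instance (tagged_string : String) (initial_form : String) (starting_symbol_number : Int) (out : List (String × Int × Int × String)) : Decidable (Spec_back_to_initial_form tagged_string initial_form starting_symbol_number out) := by unfold Spec_back_to_initial_form; infer_instance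

-- ===== CLAIM (what is proved, stated in full; the proofs are below) =====
def Claim_equal_back_to_initial_form : Prop := ∀ (tagged_string : String) (initial_form : String) (starting_symbol_number : Int), Dom_back_to_initial_form tagged_string initial_form starting_symbol_number → Pre_back_to_initial_form tagged_string initial_form starting_symbol_number → Spec_back_to_initial_form tagged_string initial_form starting_symbol_number (back_to_initial_form tagged_string initial_form starting_symbol_number)

-- ===== LEMMAS AND PROOFS =====

lemma pvPunctSet_eq : pvPunctSet = [".", ",", ":", ";", "'", "!", "?", "-", "\""] := by decide

lemma pv_mem_eq (w : String) : w ∈ pvPunctListA ↔ w ∈ pvPunctSet := by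
  rw [pvPunctSet_eq]
  by_cases h : w = "'" <;> simp [pvPunctListA, h]

lemma pvAccumulate_ne_nil (s : Int) (l : List Int) : pvAccumulate s l ≠ [] := by
  cases l <;> simp [pvAccumulate]

lemma pvAccum_getD (l : List Int) (s : Int) (j : Nat) (hj : j < l.length) :
    ((pvAccumulate s l).dropLast).getD j 0 = s + (l.take j).sum := by
  induction l generalizing s j with
  | nil => simp at hj
  | cons a t ih =>
    have hne := pvAccumulate_ne_nil (s + a) t
    rw [show pvAccumulate s (a :: t) = s :: pvAccumulate (s + a) t from rfl]
    rw [List.dropLast_cons_of_ne_nil hne]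
    cases j with
    | zero => simp
    | succ j =>
      simp only [List.getD_cons_succ, List.take_succ_cons, List.sum_cons]
      rw [ih (s + a) j (by simpa using hj)]
      ring

lemma pv_loop_eq (ws tg : List String) (s0 : Int) (k : Nat) (hk : k ≤ ws.length) :
    ((List.range k).map (fun (j : ℕ) => (j : ℤ))).foldl (pvStepA ws tg) ([], s0)
      = ((List.range k).map (fun (j : ℕ) => pvEntB ws tg ((pvAccumulate s0 (ws.map pvAdv)).dropLast) (ws.map pvAdv) (j : ℤ)),
         s0 + ((ws.map pvAdv).take k).sum) := by
  induction k with
  | zero => simp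
  | succ k ih =>
    have hk' : k ≤ ws.length := Nat.le_of_succ_le hk
    have hklt : k < ws.length := hk
    rw [List.range_succ, List.map_append, List.foldl_append, ih hk']
    simp only [List.map_cons, List.map_nil, List.foldl_cons, List.foldl_nil]
    have hget : ws[k]? = some ws[k] := List.getElem?_eq_getElem hklt
    have hadvlen : k < (ws.map pvAdv).length := by simpa using hklt
    have hstart' : ((pvAccumulate s0 (ws.map pvAdv)).dropLast)[k]?.getD 0
        = s0 + ((ws.map pvAdv).take k).sum := by
      rw [← List.getD_eq_getElem?_getD]; exact pvAccum_getD _ _ _ hadvlen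
    have hsum : ((ws.map pvAdv).take (k + 1)).sum = ((ws.map pvAdv).take k).sum + pvAdv ws[k] := by
      rw [List.sum_take_succ _ _ hadvlen]
      simp
    by_cases hp : ws[k] ∈ pvPunctSet <;>
      simp [pvStepA, pvEntB, pvAdv, pv_mem_eq, hsum, hget, hstart', hp, Prod.ext_iff,
        List.getD_eq_getElem?_getD] <;>
      omega

-- ===== VERDICT (by name: the statement is the Claim_ definition above) =====
theorem back_to_initial_form_spec : Claim_equal_back_to_initial_form := by
  intro ts ifm s0 _ _
  unfold Spec_back_to_initial_form
  simp only [back_to_initial_form, back_to_initial_form_alt]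
  rw [PySem.List.pyRange_zero_natCast]
  rw [pv_loop_eq (PySem.Str.split₀ ifm) (PySem.Str.split₀ ts) s0 _ le_rfl]
  simp [List.map_map, Function.comp]
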